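-- pv_equiv track=rewrite | github.com/skanderkaroui/Coding-Problems-Practice | C_Crossing_the_Road_The_Unusual_Traffic_Light_Challenge.py | road_crossing
-- ===== SOURCE A (Python) =====
-- def road_crossing(n, c, s):
--     # Find the index of the current color (c) in the sequence
--     curr_index = s.index(c)
--     min_wait = float('inf')
--     found_green = False
--     for i in range(n):
--         # Find the next occurrence of green (g) after the current index
--         next_index = (curr_index + i) % n
--         if s[next_index] == 'g':
--             # Calculate the number of seconds needed to wait until green
--             wait_time = (next_index - curr_index) % n
--             min_wait = min(min_wait, wait_time)
--             found_green = True
--             break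
--     # If green doesn't appear after the current index, wait until the end of the cycle
--     if not found_green:
--         min_wait = n - curr_index
--     return min_wait
-- ===== SOURCE B (Python) =====
-- def road_crossing(n, c, s):
--     curr_index = s.index(c)
--     offs = [(j - curr_index) % n for j in range(n) if s[j] == 'g']
--     return min(offs) if offs else n - curr_index
-- ===== Notes on version B (the rewrite author's own statement) =====
-- stated objective: alternative
-- what changed: A scans outward from the current index and breaks at the first green; B collects the cyclic offset of every green position in one comprehension and takes the minimum, with the same n - curr_index fallback when no green is scanned.
-- outside the precondition, e.g. on road_crossing(3, 'g', ['g', 'r']): A returns 0, B raises IndexError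
import Mathlib
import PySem

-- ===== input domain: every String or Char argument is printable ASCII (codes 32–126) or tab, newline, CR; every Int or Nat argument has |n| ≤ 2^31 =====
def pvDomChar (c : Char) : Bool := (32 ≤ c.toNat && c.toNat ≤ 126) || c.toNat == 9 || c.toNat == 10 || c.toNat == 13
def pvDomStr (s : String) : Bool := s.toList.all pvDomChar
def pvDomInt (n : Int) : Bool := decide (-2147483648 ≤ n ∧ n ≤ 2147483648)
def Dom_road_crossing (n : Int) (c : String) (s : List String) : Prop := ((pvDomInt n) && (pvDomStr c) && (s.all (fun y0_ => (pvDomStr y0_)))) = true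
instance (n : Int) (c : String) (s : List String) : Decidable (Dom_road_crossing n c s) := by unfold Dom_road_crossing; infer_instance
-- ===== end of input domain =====

-- B replaces A's outward scan-and-break from the current index by a collect-all-green-offsets
-- comprehension followed by min (alternative decomposition, same cost).
-- ===== PORT A =====
-- the for-loop with break: first i in range(n) whose scanned cell is green wins
def roadLoopA (s : List String) (curr n : Int) : List Int → Int
  | [] => n - curr                                   -- loop ended, found_green False
  | i :: rest =>
      let next := PySem.Int.mod (curr + i) n
      match PySem.List.pyGet? s next with
      | some v => if v == "g" then PySem.Int.mod (next - curr) n else roadLoopA s curr n rest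
      | none => 0                                    -- IndexError in Python; excluded by Pre_

def road_crossing (n : Int) (c : String) (s : List String) : Int :=
  match PySem.List.index? s c with
  | none => 0                                        -- ValueError in Python; excluded by Pre_
  | some ci => roadLoopA s (ci : Int) n (PySem.List.pyRange 0 n)

-- ===== PORT B =====
def road_crossing_alt (n : Int) (c : String) (s : List String) : Int :=
  match PySem.List.index? s c with
  | none => 0                                        -- ValueError in Python; excluded by Pre_
  | some ci =>
      let curr : Int := ci
      let offs := (PySem.List.pyRange 0 n).filterMap (fun j =>
        match PySem.List.pyGet? s j with
        | some v => if v == "g" then some (PySem.Int.mod (j - curr) n) else none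
        | none => none)                              -- IndexError in Python; excluded by Pre_
      match PySem.List.min? offs id with
      | some m => m
      | none => n - curr

-- ===== PRECONDITION & SPEC =====
-- Pre_ excludes c ∉ s (Python's s.index raises ValueError) and n > len(s), where A's return
-- depends accidentally on whether a green cell is scanned before an out-of-range index
-- (A may return or raise IndexError there, and B's full scan raises).
def Pre_road_crossing (n : Int) (c : String) (s : List String) : Prop :=
  c ∈ s ∧ n ≤ (s.length : Int)
instance (n : Int) (c : String) (s : List String) : Decidable (Pre_road_crossing n c s) := by
  unfold Pre_road_crossing; infer_instance

def pvWitness_road_crossing : Int × String × List String := (3, "r", ["r", "g", "y"])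

def Spec_road_crossing (n : Int) (c : String) (s : List String) (out : Int) : Prop := out = road_crossing_alt n c s
instance (n : Int) (c : String) (s : List String) (out : Int) : Decidable (Spec_road_crossing n c s out) := by unfold Spec_road_crossing; infer_instance

-- ===== CLAIM (what is proved, stated in full; the proofs are below) =====
def Claim_equal_road_crossing : Prop := ∀ (n : Int) (c : String) (s : List String), Dom_road_crossing n c s → Pre_road_crossing n c s → Spec_road_crossing n c s (road_crossing n c s)

-- ===== LEMMAS AND PROOFS =====

-- Python's (floor) mod for a positive modulus: a value already in [0, n) is fixed
theorem pymod_self {i n : Int} (hn : 0 < n) (h0 : 0 ≤ i) (h1 : i < n) :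
    PySem.Int.mod i n = i := by
  rw [PySem.Int.mod_eq_emod_of_pos hn]
  exact Int.emod_eq_of_lt h0 h1

theorem pymod_sub_mod {a b n : Int} (hn : 0 < n) :
    PySem.Int.mod (PySem.Int.mod a n - b) n = PySem.Int.mod (a - b) n := by
  simp only [PySem.Int.mod_eq_emod_of_pos hn]
  conv_rhs => rw [Int.sub_emod]
  rw [Int.sub_emod, Int.emod_emod_of_dvd _ (dvd_refl n)]

theorem pymod_add_mod {a b n : Int} (hn : 0 < n) :
    PySem.Int.mod (a + PySem.Int.mod b n) n = PySem.Int.mod (a + b) n := by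
  simp only [PySem.Int.mod_eq_emod_of_pos hn]
  conv_rhs => rw [Int.add_emod]
  rw [Int.add_emod, Int.emod_emod_of_dvd _ (dvd_refl n)]

-- indexing is safe on the scanned window
theorem pyGet?_isSome {s : List String} {j : Int} (h0 : 0 ≤ j) (h1 : j < (s.length : Int)) :
    ∃ v, PySem.List.pyGet? s j = some v := by
  have hj : j.toNat < s.length := by omega
  have hcast : j = ((j.toNat : Nat) : Int) := by omega
  rw [hcast, PySem.List.pyGet?_natCast]
  exact ⟨s[j.toNat], by simp [List.getElem?_eq_getElem hj]⟩

-- the Green test both programs apply to a cell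
def GreenAt (s : List String) (j : Int) : Bool :=
  match PySem.List.pyGet? s j with
  | some v => v == "g"
  | none => false

-- A's loop over the remaining range returns the first hit (as its own offset), else the fallback
theorem loopA_eq_find (s : List String) (curr n : Int) (hn : 0 < n)
    (hlen : n ≤ (s.length : Int)) :
    ∀ a, 0 ≤ a →
      roadLoopA s curr n (PySem.List.pyRange a n) =
        match (PySem.List.pyRange a n).find?
            (fun i => GreenAt s (PySem.Int.mod (curr + i) n)) with
        | some i => i
        | none => n - curr := by
  intro a ha
  by_cases hab : a < n
  · have hterm : (n - (a + 1)).toNat < (n - a).toNat := by omega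
    rw [PySem.List.pyRange_one_cons hab]
    have hm0 : 0 ≤ PySem.Int.mod (curr + a) n := PySem.Int.mod_nonneg _ hn
    have hm1 : PySem.Int.mod (curr + a) n < n := PySem.Int.mod_lt _ hn
    obtain ⟨v, hv⟩ := pyGet?_isSome hm0 (lt_of_lt_of_le hm1 hlen)
    simp only [roadLoopA, List.find?_cons, GreenAt, hv]
    by_cases hg : v == "g"
    · simp only [hg, if_pos]
      rw [pymod_sub_mod hn]
      have : curr + a - curr = a := by ring
      rw [this, pymod_self hn ha hab]
    · simp only [hg, Bool.false_eq_true]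
      simpa using loopA_eq_find s curr n hn hlen (a + 1) (by omega)
  · have : PySem.List.pyRange a n = [] := by
      by_contra h
      obtain ⟨x, hx⟩ := List.exists_mem_of_ne_nil _ h
      have := PySem.List.mem_pyRange_one.mp hx
      omega
    simp [this, roadLoopA]
termination_by a _ => (n - a).toNat
decreasing_by omega

-- find? over an integer range returns the least element satisfying the predicate
theorem find?_pyRange_min {P : Int → Bool} {a b i : Int}
    (h : (PySem.List.pyRange a b).find? P = some i) :
    ∀ m ∈ PySem.List.pyRange a b, P m → i ≤ m := by
  intro m hm hPm
  by_cases hab : a < b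
  · rw [PySem.List.pyRange_one_cons hab] at h hm
    simp only [List.find?_cons] at h
    by_cases hPa : P a
    · simp only [hPa, Option.some.injEq] at h
      rcases List.mem_cons.mp hm with h' | h'
      · omega
      · have := PySem.List.mem_pyRange_one.mp h'
        omega
    · simp [hPa] at h
      rcases List.mem_cons.mp hm with h' | h'
      · subst h'; simp [hPm] at hPa
      · exact find?_pyRange_min h m h' hPm
  · exfalso
    have : PySem.List.pyRange a b = [] := by
      by_contra hne
      obtain ⟨x, hx⟩ := List.exists_mem_of_ne_nil _ hne
      have := PySem.List.mem_pyRange_one.mp hx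
      omega
    rw [this] at h; simp at h
termination_by (b - a).toNat
decreasing_by omega

-- a nonempty list has a Python minimum
theorem min?_isSome_of_ne_nil {α κ : Type} [LT κ] [DecidableLT κ]
    {xs : List α} (key : α → κ) (h : xs ≠ []) :
    ∃ m, PySem.List.min? xs key = some m := by
  cases xs with
  | nil => exact absurd rfl h
  | cons x xs =>
    simp only [PySem.List.min?, List.foldl_cons]
    clear h
    induction xs generalizing x with
    | nil => exact ⟨x, rfl⟩
    | cons y ys ih =>
      simp only [List.foldl_cons]
      by_cases hlt : key y < key x
      · simp only [hlt, if_pos]; exact ih y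
      · simp only [hlt, if_false]; exact ih x

-- the offsets list of B, abbreviated for the proofs
def offsOf (s : List String) (curr n : Int) : List Int :=
  (PySem.List.pyRange 0 n).filterMap (fun j =>
    match PySem.List.pyGet? s j with
    | some v => if v == "g" then some (PySem.Int.mod (j - curr) n) else none
    | none => none)

theorem mem_offsOf {s : List String} {curr n x : Int} :
    x ∈ offsOf s curr n ↔
      ∃ j, j ∈ PySem.List.pyRange 0 n ∧ GreenAt s j = true ∧ x = PySem.Int.mod (j - curr) n := by
  simp only [offsOf, List.mem_filterMap, GreenAt]
  constructor
  · rintro ⟨j, hj, hfx⟩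
    cases hv : PySem.List.pyGet? s j with
    | none => rw [hv] at hfx; simp at hfx
    | some v =>
      rw [hv] at hfx
      by_cases hg : (v == "g") = true
      · refine ⟨j, hj, by rw [hv]; exact hg, ?_⟩
        simp only [hg, if_pos, Option.some.injEq] at hfx
        omega
      · simp [hg] at hfx
  · rintro ⟨j, hj, hg, hx⟩
    cases hv : PySem.List.pyGet? s j with
    | none => rw [hv] at hg; simp at hg
    | some v =>
      rw [hv] at hg
      exact ⟨j, hj, by rw [hv]; simp [hg, hx]⟩

-- ===== VERDICT (by name: the statement is the Claim_ definition above) =====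
theorem road_crossing_spec : Claim_equal_road_crossing := by
  intro n c s _hDom hPre
  obtain ⟨hc, hlen⟩ := hPre
  unfold Spec_road_crossing road_crossing road_crossing_alt
  cases hidx : PySem.List.index? s c with
  | none =>
    rw [PySem.List.index?, List.idxOf?_eq_none_iff] at hidx
  | some ci =>
    show roadLoopA s (ci : Int) n (PySem.List.pyRange 0 n) = _
    set curr : Int := (ci : Int) with hcurr
    by_cases hn : 0 < n
    · rw [loopA_eq_find s curr n hn hlen 0 le_rfl]
      show _ = (match PySem.List.min? (offsOf s curr n) id with
        | some m => m
        | none => n - curr)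
      cases hF : (PySem.List.pyRange 0 n).find?
          (fun i => GreenAt s (PySem.Int.mod (curr + i) n)) with
      | none =>
        have hoffs : offsOf s curr n = [] := by
          rw [List.eq_nil_iff_forall_not_mem]
          intro x hx
          obtain ⟨j, hj, hgj, hxj⟩ := mem_offsOf.mp hx
          have hjb := PySem.List.mem_pyRange_one.mp hj
          have hx0 : 0 ≤ x := hxj ▸ PySem.Int.mod_nonneg _ hn
          have hx1 : x < n := hxj ▸ PySem.Int.mod_lt _ hn
          have hxmem : x ∈ PySem.List.pyRange 0 n :=
            PySem.List.mem_pyRange_one.mpr ⟨hx0, hx1⟩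
          have hnotP := List.find?_eq_none.mp hF x hxmem
          apply hnotP
          have hback : PySem.Int.mod (curr + x) n = j := by
            rw [hxj, pymod_add_mod hn]
            have hc2 : curr + (j - curr) = j := by ring
            rw [hc2, pymod_self hn hjb.1 hjb.2]
          simp only [hback, hgj]
        rw [hoffs]
        rfl
      | some i =>
        have hPi := List.find?_some hF
        have hiMem := List.mem_of_find?_eq_some hF
        have hib := PySem.List.mem_pyRange_one.mp hiMem
        have hiOffs : i ∈ offsOf s curr n := by
          apply mem_offsOf.mpr
          refine ⟨PySem.Int.mod (curr + i) n,
            PySem.List.mem_pyRange_one.mpr ⟨PySem.Int.mod_nonneg _ hn, PySem.Int.mod_lt _ hn⟩,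
            hPi, ?_⟩
          rw [pymod_sub_mod hn]
          have : curr + i - curr = i := by ring
          rw [this, pymod_self hn hib.1 hib.2]
        obtain ⟨m, hm⟩ := min?_isSome_of_ne_nil (id : Int → Int)
          (List.ne_nil_of_mem hiOffs)
        rw [hm]
        have hmOffs := PySem.List.min?_mem hm
        obtain ⟨j, hj, hgj, hmj⟩ := mem_offsOf.mp hmOffs
        have hjb := PySem.List.mem_pyRange_one.mp hj
        have hm0 : 0 ≤ m := hmj ▸ PySem.Int.mod_nonneg _ hn
        have hm1 : m < n := hmj ▸ PySem.Int.mod_lt _ hn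
        have hPm : GreenAt s (PySem.Int.mod (curr + m) n) = true := by
          have : PySem.Int.mod (curr + m) n = j := by
            rw [hmj, pymod_add_mod hn]
            have : curr + (j - curr) = j := by ring
            rw [this, pymod_self hn hjb.1 hjb.2]
          rw [this]; exact hgj
        have him : i ≤ m := find?_pyRange_min hF m
          (PySem.List.mem_pyRange_one.mpr ⟨hm0, hm1⟩) hPm
        have hmi : m ≤ i := PySem.List.min?_isMin hm i hiOffs
        exact le_antisymm him hmi
    · have hempty : PySem.List.pyRange 0 n = [] := by
        by_contra hne
        obtain ⟨x, hx⟩ := List.exists_mem_of_ne_nil _ hne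
        have := PySem.List.mem_pyRange_one.mp hx
        omega
      show roadLoopA s curr n (PySem.List.pyRange 0 n) =
        (match PySem.List.min? (offsOf s curr n) id with
          | some m => m
          | none => n - curr)
      rw [hempty]
      simp [roadLoopA, offsOf, hempty, PySem.List.min?]
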